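-- pv_equiv track=rewrite | github.com/morzack/advent-of-code-2019 | day-18.py | get_string_map
-- ===== SOURCE A (Python) =====
-- def get_tile_bounds(tiles):
--     # get bounds for x and y
--     min_x = max_x = 0
--     min_y = max_y = 0
--     for tile in tiles:
--         x, y = tile
--         min_x = min(min_x, x)
--         min_y = min(min_y, y)
--         max_x = max(max_x, x)
--         max_y = max(max_y, y)
--     return (min_x, max_x+1), (min_y, max_y+1)
--
-- def get_string_map(tiles, pos=(0, 0)):
--     x_bounds, y_bounds = get_tile_bounds(tiles)
--     board = ""
--     for y in range(y_bounds[0], y_bounds[1]):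
--         for x in range(x_bounds[0], x_bounds[1]):
--             if (x, y) == pos:
--                 board += "@"
--             else:
--                 board += tiles.get((x, y), " ")
--         board += "\n"
--     return board
-- ===== SOURCE B (Python) =====
-- def get_string_map(tiles, pos=(0, 0)):
--     min_x = min([0] + [x for x, _ in tiles])
--     min_y = min([0] + [y for _, y in tiles])
--     max_x = max([0] + [x for x, _ in tiles])
--     max_y = max([0] + [y for _, y in tiles])
--     w = max_x - min_x + 1
--     h = max_y - min_y + 1
--     grid = [[" "] * w for _ in range(h)]
--     for (x, y), c in tiles.items():
--         grid[y - min_y][x - min_x] = c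
--     px, py = pos
--     if min_x <= px <= max_x and min_y <= py <= max_y:
--         grid[py - min_y][px - min_x] = "@"
--     return "".join("".join(row) + "\n" for row in grid)
-- ===== Notes on version B (the rewrite author's own statement) =====
-- stated objective: alternative
-- what changed: B fills a dense 2D grid with one pass over the tiles dict (then overwrites the in-bounds position with '@' and joins the rows), instead of A's per-cell dict lookup over every coordinate of the bounding box.
import Mathlib
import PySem

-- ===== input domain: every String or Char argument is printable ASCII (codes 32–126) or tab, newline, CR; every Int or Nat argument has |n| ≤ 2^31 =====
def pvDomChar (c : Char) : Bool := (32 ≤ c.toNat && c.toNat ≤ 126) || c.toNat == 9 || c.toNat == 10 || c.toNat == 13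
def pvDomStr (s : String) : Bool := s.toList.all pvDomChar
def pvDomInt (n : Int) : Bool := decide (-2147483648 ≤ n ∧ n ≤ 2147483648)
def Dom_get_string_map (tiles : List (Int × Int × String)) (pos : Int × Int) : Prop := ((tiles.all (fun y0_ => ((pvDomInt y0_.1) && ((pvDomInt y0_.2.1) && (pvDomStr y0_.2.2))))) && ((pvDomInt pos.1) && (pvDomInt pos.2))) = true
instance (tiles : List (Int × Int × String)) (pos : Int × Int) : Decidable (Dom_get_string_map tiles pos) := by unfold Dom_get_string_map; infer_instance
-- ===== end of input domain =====

-- B renders the map by filling a dense grid in one pass over the tiles dict (instead of a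
-- per-cell dict lookup over the whole bounding box); objective: alternative data structure.

-- ===== PORT A =====
-- helper get_tile_bounds: the running min/max loop over the dict's keys
def get_tile_bounds (tiles : List (Int × Int × String)) : (Int × Int) × (Int × Int) :=
  let b := tiles.foldl
    (fun (b : Int × Int × Int × Int) t =>
      (min b.1 t.1, min b.2.1 t.2.1, max b.2.2.1 t.1, max b.2.2.2 t.2.1))
    (0, 0, 0, 0)
  ((b.1, b.2.2.1 + 1), (b.2.1, b.2.2.2 + 1))

-- tiles.get((x, y), " ") : first-match lookup in the association list (keys are unique, see Pre_)
def tilesGet (tiles : List (Int × Int × String)) (x y : Int) : Option String :=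
  (tiles.find? (fun t => t.1 == x && t.2.1 == y)).map (fun t => t.2.2)

def get_string_map (tiles : List (Int × Int × String)) (pos : Int × Int) : String :=
  let xb := (get_tile_bounds tiles).1
  let yb := (get_tile_bounds tiles).2
  (PySem.List.pyRange yb.1 yb.2 1).foldl
    (fun board y =>
      ((PySem.List.pyRange xb.1 xb.2 1).foldl
        (fun b x => b ++ (if (x, y) = pos then "@" else (tilesGet tiles x y).getD " ")) board)
      ++ "\n")
    ""

-- ===== PORT B =====
def get_string_map_alt (tiles : List (Int × Int × String)) (pos : Int × Int) : String :=
  let minX := (tiles.map (fun t => t.1)).foldl min 0     -- min([0] + [x for x,_ in tiles])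
  let minY := (tiles.map (fun t => t.2.1)).foldl min 0
  let maxX := (tiles.map (fun t => t.1)).foldl max 0
  let maxY := (tiles.map (fun t => t.2.1)).foldl max 0
  let w := (maxX - minX + 1).toNat
  let h := (maxY - minY + 1).toNat
  let grid0 : List (List String) := List.replicate h (List.replicate w " ")
  -- one pass over the tiles, writing each char into the dense grid
  let grid1 := tiles.foldl
    (fun g t => g.modify (t.2.1 - minY).toNat (fun row => row.set (t.1 - minX).toNat t.2.2))
    grid0
  let grid2 :=
    if minX ≤ pos.1 ∧ pos.1 ≤ maxX ∧ minY ≤ pos.2 ∧ pos.2 ≤ maxY then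
      grid1.modify (pos.2 - minY).toNat (fun row => row.set (pos.1 - minX).toNat "@")
    else grid1
  String.join (grid2.map (fun row => String.join row ++ "\n"))

-- ===== PRECONDITION & SPEC =====
-- Pre_ requires the (x, y) keys of the association list to be pairwise distinct — exactly the lists
-- that represent a Python dict (a dict cannot hold duplicate keys, so no Python input is excluded).
def Pre_get_string_map (tiles : List (Int × Int × String)) (pos : Int × Int) : Prop :=
  (tiles.map (fun t => (t.1, t.2.1))).Nodup
instance (tiles : List (Int × Int × String)) (pos : Int × Int) : Decidable (Pre_get_string_map tiles pos) := by unfold Pre_get_string_map; infer_instance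

def pvWitness_get_string_map : (List (Int × Int × String)) × (Int × Int) :=
  ([(0, 0, "#"), (2, 1, "."), (-1, -1, "x")], (1, 1))

def Spec_get_string_map (tiles : List (Int × Int × String)) (pos : Int × Int) (out : String) : Prop := out = get_string_map_alt tiles pos
instance (tiles : List (Int × Int × String)) (pos : Int × Int) (out : String) : Decidable (Spec_get_string_map tiles pos out) := by unfold Spec_get_string_map; infer_instance

-- ===== CLAIM (what is proved, stated in full; the proofs are below) =====
def Claim_equal_get_string_map : Prop := ∀ (tiles : List (Int × Int × String)) (pos : Int × Int), Dom_get_string_map tiles pos → Pre_get_string_map tiles pos → Spec_get_string_map tiles pos (get_string_map tiles pos)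

-- ===== LEMMAS AND PROOFS =====

theorem foldl_sappend (l : List String) (init : String) :
    l.foldl (· ++ ·) init = init ++ String.join l := by
  induction l generalizing init with
  | nil => simp [String.join]
  | cons x xs ih =>
      have hj : String.join (x :: xs) = x ++ String.join xs := by
        show List.foldl (· ++ ·) ("" ++ x) xs = _
        rw [String.empty_append, ih]
      simp only [List.foldl_cons, ih, hj, String.append_assoc]

theorem join_foldl_append {α : Type} (l : List α) (f : α → String) (init : String) :
    l.foldl (fun b x => b ++ f x) init = init ++ String.join (l.map f) := by
  have := foldl_sappend (l.map f) init
  rw [← this, List.foldl_map]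

-- proof-side helpers
def cellS (tiles : List (Int × Int × String)) (pos : Int × Int) (x y : Int) : String :=
  if (x, y) = pos then "@" else (tilesGet tiles x y).getD " "

def cellAt (g : List (List String)) (r c : Nat) : Option String :=
  g[r]?.bind (fun row => row[c]?)

def writeT (mX mY : Int) (g : List (List String)) (t : Int × Int × String) : List (List String) :=
  g.modify (t.2.1 - mY).toNat (fun row => row.set (t.1 - mX).toNat t.2.2)

-- A's four-accumulator bounds fold is the four separate folds
theorem bounds_fold (tiles : List (Int × Int × String)) (a b c d : Int) :
    tiles.foldl
      (fun (s : Int × Int × Int × Int) t =>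
        (min s.1 t.1, min s.2.1 t.2.1, max s.2.2.1 t.1, max s.2.2.2 t.2.1)) (a, b, c, d)
    = ((tiles.map (fun t => t.1)).foldl min a, (tiles.map (fun t => t.2.1)).foldl min b,
       (tiles.map (fun t => t.1)).foldl max c, (tiles.map (fun t => t.2.1)).foldl max d) := by
  induction tiles generalizing a b c d with
  | nil => rfl
  | cons t ts ih => simp only [List.foldl_cons, List.map_cons, ih]

theorem length_fill (mX mY : Int) (ts : List (Int × Int × String)) (g : List (List String)) :
    (ts.foldl (writeT mX mY) g).length = g.length := by
  induction ts generalizing g with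
  | nil => rfl
  | cons t ts ih => simp only [List.foldl_cons, ih, writeT, List.length_modify]

theorem rowlen_fill (mX mY : Int) (ts : List (Int × Int × String)) (g : List (List String))
    (j : Nat) : ((ts.foldl (writeT mX mY) g)[j]?).map List.length = (g[j]?).map List.length := by
  induction ts generalizing g with
  | nil => rfl
  | cons t ts ih =>
      simp only [List.foldl_cons, ih]
      simp only [writeT, List.getElem?_modify]
      cases g[j]? with
      | none => rfl
      | some row =>
          simp only [Option.map_some]
          split <;> simp [List.length_set]

-- the fill loop's cell value: the unique tile at that cell, else the cell of the start grid
theorem fill_cell (mX mY : Int) (ts : List (Int × Int × String))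
    (hkeys : (ts.map (fun t => (t.1, t.2.1))).Nodup)
    (hb : ∀ t ∈ ts, mX ≤ t.1 ∧ mY ≤ t.2.1)
    (g : List (List String)) (r c : Nat)
    (hr : r < g.length)
    (hw : ∀ (j : Nat) (row : List String), g[j]? = some row → c < row.length) :
    cellAt (ts.foldl (writeT mX mY) g) r c
      = (match ts.find? (fun t => t.1 == mX + (c : Int) && t.2.1 == mY + (r : Int)) with
         | some t => some t.2.2
         | none => cellAt g r c) := by
  induction ts generalizing g with
  | nil => rfl
  | cons t ts ih =>
      have hbt := hb t (by simp)
      have hb' : ∀ t' ∈ ts, mX ≤ t'.1 ∧ mY ≤ t'.2.1 := fun t' ht' => hb t' (by simp [ht'])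
      have hkeys' : (ts.map (fun t => (t.1, t.2.1))).Nodup := (List.nodup_cons.mp hkeys).2
      have hnotin : (t.1, t.2.1) ∉ ts.map (fun t => (t.1, t.2.1)) := (List.nodup_cons.mp hkeys).1
      -- shape of writeT g t
      have hr1 : r < (writeT mX mY g t).length := by
        simpa [writeT, List.length_modify] using hr
      have hw1 : ∀ (j : Nat) (row : List String), (writeT mX mY g t)[j]? = some row →
          c < row.length := by
        intro j row hrow
        simp only [writeT, List.getElem?_modify] at hrow
        cases hg : g[j]? with
        | none => simp [hg] at hrow
        | some row0 =>
            rw [hg] at hrow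
            have hc0 := hw j row0 hg
            have hrow' : row = if (t.2.1 - mY).toNat = j
                then row0.set (t.1 - mX).toNat t.2.2 else row0 := by
              split at hrow <;> simp_all
            split at hrow' <;> subst hrow' <;> simp [List.length_set, hc0]
      simp only [List.foldl_cons, List.find?_cons]
      by_cases hp : (t.1 == mX + (c : Int) && t.2.1 == mY + (r : Int)) = true
      · -- the head tile writes exactly this cell; no later tile has the same key
        have hx : t.1 = mX + (c : Int) := by
          have := hp; simp only [Bool.and_eq_true, beq_iff_eq] at this; exact this.1
        have hy : t.2.1 = mY + (r : Int) := by
          have := hp; simp only [Bool.and_eq_true, beq_iff_eq] at this; exact this.2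
        have hnone : ts.find? (fun t' => t'.1 == mX + (c : Int) && t'.2.1 == mY + (r : Int))
            = none := by
          rw [List.find?_eq_none]
          intro t' ht' hp'
          simp only [Bool.and_eq_true, beq_iff_eq] at hp'
          exact hnotin (by
            have : (t.1, t.2.1) = (t'.1, t'.2.1) := by rw [hx, hy, hp'.1, hp'.2]
            rw [this]; exact List.mem_map_of_mem ht')
        rw [ih hkeys' hb' _ hr1 hw1, hnone, hp]
        -- now: cellAt (writeT g t) r c = some t.2.2
        have hrow : (t.2.1 - mY).toNat = r := by omega
        have hcol : (t.1 - mX).toNat = c := by omega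
        cases hg : g[r]? with
        | none => exact absurd (List.getElem?_eq_none_iff.mp hg) (by omega)
        | some row =>
            have hc : c < row.length := hw r row hg
            simp [cellAt, writeT, hrow, hcol, List.getElem?_modify, hg, List.getElem?_set, hc]
      · -- the head tile writes some other cell: this cell is untouched
        have hcell : cellAt (writeT mX mY g t) r c = cellAt g r c := by
          simp only [Bool.and_eq_true, beq_iff_eq, not_and_or] at hp
          by_cases hrow : (t.2.1 - mY).toNat = r
          · have hy : t.2.1 = mY + (r : Int) := by omega
            have hx : t.1 ≠ mX + (c : Int) := hp.resolve_right (fun h => h hy)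
            have hcol : (t.1 - mX).toNat ≠ c := by omega
            cases hg : g[r]? with
            | none => simp [cellAt, writeT, List.getElem?_modify, hg]
            | some row =>
                simp [cellAt, writeT, List.getElem?_modify, hg, hrow, List.getElem?_set, hcol]
          · simp [cellAt, writeT, List.getElem?_modify, hrow]
        rw [ih hkeys' hb' _ hr1 hw1, hcell]
        simp only [Bool.not_eq_true] at hp
        rw [hp]

-- cellAt of the  '@' overwrite: a modify+set seen through cellAt
theorem cellAt_write (g : List (List String)) (ri ci r c : Nat) (v : String)
    (hr : ri < g.length) (hw : ∀ (j : Nat) (row : List String), g[j]? = some row → ci < row.length ∧ c < row.length) :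
    cellAt (g.modify ri (fun row => row.set ci v)) r c
      = if ri = r ∧ ci = c then some v else cellAt g r c := by
  cases hg : g[r]? with
  | none =>
      have hlen : g.length ≤ r := List.getElem?_eq_none_iff.mp hg
      have hne : ¬ (ri = r) := by omega
      simp [cellAt, List.getElem?_modify, hg, hne]
  | some row =>
      by_cases h1 : ri = r
      · subst h1
        have hci := (hw ri row hg).1
        by_cases h2 : ci = c
        · subst h2; simp [cellAt, List.getElem?_modify, hg, List.getElem?_set, hci]
        · simp [cellAt, List.getElem?_modify, hg, List.getElem?_set, h2]
      · simp [cellAt, List.getElem?_modify, hg, h1]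


theorem eq_map_of_cellAt (g : List (List String)) (n m : Nat) (f : Nat → Nat → String)
    (hlen : g.length = n)
    (hrl : ∀ (j : Nat) (row : List String), g[j]? = some row → row.length = m)
    (hcell : ∀ r c, r < n → c < m → cellAt g r c = some (f r c)) :
    g = (List.range n).map (fun r => (List.range m).map (fun c => f r c)) := by
  apply List.ext_getElem?
  intro r
  by_cases hr : r < n
  · have hrg : r < g.length := by omega
    have hg : g[r]? = some (g[r]'hrg) := List.getElem?_eq_getElem hrg
    have hrowlen : (g[r]'hrg).length = m := hrl r _ hg
    have hrow : g[r]'hrg = (List.range m).map (fun c => f r c) := by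
      apply List.ext_getElem?
      intro c
      by_cases hc : c < m
      · have h1 := hcell r c hr hc
        simp only [cellAt, hg, Option.bind_some] at h1
        rw [h1, List.getElem?_map, List.getElem?_range hc, Option.map_some]
      · rw [List.getElem?_eq_none (by omega), List.getElem?_eq_none (by simp; omega)]
    rw [hg, hrow, List.getElem?_map, List.getElem?_range hr, Option.map_some]
  · rw [List.getElem?_eq_none (by omega), List.getElem?_eq_none (by simp; omega)]

-- B's grid, rendered: row r, column c holds the cell value of (mnx+c, mny+r)
theorem alt_eq (tiles : List (Int × Int × String)) (pos : Int × Int)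
    (hkeys : (tiles.map (fun t => (t.1, t.2.1))).Nodup) :
    get_string_map_alt tiles pos =
      String.join ((List.range ((tiles.map (fun t => t.2.1)).foldl max 0 - (tiles.map (fun t => t.2.1)).foldl min 0 + 1).toNat).map (fun (r : Nat) =>
        String.join ((List.range ((tiles.map (fun t => t.1)).foldl max 0 - (tiles.map (fun t => t.1)).foldl min 0 + 1).toNat).map (fun (c : Nat) =>
          cellS tiles pos ((tiles.map (fun t => t.1)).foldl min 0 + (c : Int)) ((tiles.map (fun t => t.2.1)).foldl min 0 + (r : Int)))) ++ "\n")) := by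
  unfold get_string_map_alt
  dsimp only
  set mnx := (tiles.map (fun t => t.1)).foldl min 0 with hdmnx
  set mny := (tiles.map (fun t => t.2.1)).foldl min 0 with hdmny
  set mxx := (tiles.map (fun t => t.1)).foldl max 0 with hdmxx
  set mxy := (tiles.map (fun t => t.2.1)).foldl max 0 with hdmxy
  set w := (mxx - mnx + 1).toNat with hdw
  set h := (mxy - mny + 1).toNat with hdh
  have hmnx0 : mnx ≤ 0 := (PySem.List.foldl_min_le _ 0).1
  have hmxx0 : 0 ≤ mxx := (PySem.List.le_foldl_max _ 0).1
  have hmny0 : mny ≤ 0 := (PySem.List.foldl_min_le _ 0).1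
  have hmxy0 : 0 ≤ mxy := (PySem.List.le_foldl_max _ 0).1
  have hbx : ∀ t ∈ tiles, mnx ≤ t.1 ∧ t.1 ≤ mxx := fun t ht =>
    ⟨(PySem.List.foldl_min_le _ 0).2 t.1 (List.mem_map_of_mem ht),
     (PySem.List.le_foldl_max _ 0).2 t.1 (List.mem_map_of_mem ht)⟩
  have hby : ∀ t ∈ tiles, mny ≤ t.2.1 ∧ t.2.1 ≤ mxy := fun t ht =>
    ⟨(PySem.List.foldl_min_le _ 0).2 t.2.1 (List.mem_map_of_mem ht),
     (PySem.List.le_foldl_max _ 0).2 t.2.1 (List.mem_map_of_mem ht)⟩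
  set grid0 : List (List String) := List.replicate h (List.replicate w " ") with hdg0
  have hfold : tiles.foldl
      (fun g t => g.modify (t.2.1 - mny).toNat (fun row => row.set (t.1 - mnx).toNat t.2.2)) grid0
      = tiles.foldl (writeT mnx mny) grid0 := rfl
  rw [hfold]
  set grid1 := tiles.foldl (writeT mnx mny) grid0 with hdg1
  -- facts about grid1
  have hlen1 : grid1.length = h := by rw [hdg1, length_fill]; simp [hdg0]
  have hrl1 : ∀ (j : Nat) (row : List String), grid1[j]? = some row → row.length = w := by
    intro j row hj
    have hrlf := rowlen_fill mnx mny tiles grid0 j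
    rw [← hdg1, hj] at hrlf
    by_cases hjh : j < h
    · rw [hdg0] at hrlf
      simp [List.getElem?_replicate, hjh] at hrlf
      simpa using hrlf
    · rw [hdg0] at hrlf; simp [List.getElem?_replicate, hjh] at hrlf
  have hcell1 : ∀ r c : Nat, r < h → c < w →
      cellAt grid1 r c = some ((tilesGet tiles (mnx + (c : Int)) (mny + (r : Int))).getD " ") := by
    intro r c hr hc
    rw [hdg1, fill_cell mnx mny tiles hkeys
      (fun t ht => ⟨(hbx t ht).1, (hby t ht).1⟩) grid0 r c
      (by simp [hdg0]; omega)
      (by intro j row hj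
          rw [hdg0] at hj
          simp [List.getElem?_replicate] at hj
          simp [← hj.2, hc])]
    have htg : tilesGet tiles (mnx + (c : Int)) (mny + (r : Int))
        = (tiles.find? (fun t => t.1 == mnx + (c : Int) && t.2.1 == mny + (r : Int))).map
            (fun t => t.2.2) := rfl
    cases hf : tiles.find? (fun t => t.1 == mnx + (c : Int) && t.2.1 == mny + (r : Int)) with
    | some t => simp [htg, hf]
    | none =>
        simp [htg, hf, cellAt, hdg0, List.getElem?_replicate, hr, hc]
  -- the '@' overwrite, then the rendering
  have hmain : (if mnx ≤ pos.1 ∧ pos.1 ≤ mxx ∧ mny ≤ pos.2 ∧ pos.2 ≤ mxy then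
        grid1.modify (pos.2 - mny).toNat (fun row => row.set (pos.1 - mnx).toNat "@")
      else grid1)
      = (List.range h).map (fun (r : Nat) => (List.range w).map (fun (c : Nat) =>
          cellS tiles pos (mnx + (c : Int)) (mny + (r : Int)))) := by
    split
    case isTrue hin =>
      apply eq_map_of_cellAt
      · simp [List.length_modify, hlen1]
      · intro j row hj
        simp only [List.getElem?_modify] at hj
        cases hg : grid1[j]? with
        | none => simp [hg] at hj
        | some row0 =>
            rw [hg] at hj
            have hl0 := hrl1 j row0 hg
            have hj' : row = if (pos.2 - mny).toNat = j
                then row0.set (pos.1 - mnx).toNat "@" else row0 := by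
              split at hj <;> simp_all
            split at hj' <;> subst hj' <;> simp [List.length_set, hl0]
      · intro r c hr hc
        rw [cellAt_write grid1 (pos.2 - mny).toNat (pos.1 - mnx).toNat r c "@"
          (by rw [hlen1]; omega)
          (by intro j row hj; have := hrl1 j row hj; constructor <;> omega)]
        by_cases hq : (mnx + (c : Int), mny + (r : Int)) = pos
        · have h1 : (pos.2 - mny).toNat = r ∧ (pos.1 - mnx).toNat = c := by
            have h2 : pos.1 = mnx + (c : Int) := by rw [← hq]
            have h3 : pos.2 = mny + (r : Int) := by rw [← hq]
            omega
          simp [h1, cellS, hq]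
        · have h1 : ¬ ((pos.2 - mny).toNat = r ∧ (pos.1 - mnx).toNat = c) := by
            intro hcon
            apply hq
            have : pos.1 = mnx + (c : Int) ∧ pos.2 = mny + (r : Int) := by omega
            rw [Prod.ext_iff]
            exact ⟨this.1.symm, this.2.symm⟩
          rw [if_neg h1, hcell1 r c hr hc]
          simp [cellS, hq]
    case isFalse hout =>
      apply eq_map_of_cellAt grid1 h w _ hlen1 hrl1
      intro r c hr hc
      rw [hcell1 r c hr hc]
      have hq : ¬ ((mnx + (c : Int), mny + (r : Int)) = pos) := by
        intro hcon
        apply hout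
        have h2 : pos.1 = mnx + (c : Int) := by rw [← hcon]
        have h3 : pos.2 = mny + (r : Int) := by rw [← hcon]
        refine ⟨by omega, by omega, by omega, by omega⟩
      simp [cellS, hq]
  rw [hmain, List.map_map]
  rfl

-- A's nested string loop, rendered the same way
theorem a_eq (tiles : List (Int × Int × String)) (pos : Int × Int) :
    get_string_map tiles pos =
      String.join ((List.range ((tiles.map (fun t => t.2.1)).foldl max 0 - (tiles.map (fun t => t.2.1)).foldl min 0 + 1).toNat).map (fun (r : Nat) =>
        String.join ((List.range ((tiles.map (fun t => t.1)).foldl max 0 - (tiles.map (fun t => t.1)).foldl min 0 + 1).toNat).map (fun (c : Nat) =>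
          cellS tiles pos ((tiles.map (fun t => t.1)).foldl min 0 + (c : Int)) ((tiles.map (fun t => t.2.1)).foldl min 0 + (r : Int)))) ++ "\n")) := by
  unfold get_string_map get_tile_bounds
  rw [bounds_fold]
  simp only
  rw [PySem.List.pyRange_one, PySem.List.pyRange_one]
  have hx : ((tiles.map (fun t => t.1)).foldl max 0 + 1 - (tiles.map (fun t => t.1)).foldl min 0)
      = ((tiles.map (fun t => t.1)).foldl max 0 - (tiles.map (fun t => t.1)).foldl min 0 + 1) := by ring
  have hy : ((tiles.map (fun t => t.2.1)).foldl max 0 + 1 - (tiles.map (fun t => t.2.1)).foldl min 0)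
      = ((tiles.map (fun t => t.2.1)).foldl max 0 - (tiles.map (fun t => t.2.1)).foldl min 0 + 1) := by ring
  rw [hx, hy]
  rw [List.foldl_map]
  simp only [List.foldl_map, join_foldl_append, String.append_assoc]
  rw [String.empty_append]
  rfl

-- ===== VERDICT (by name: the statement is the Claim_ definition above) =====
theorem get_string_map_spec : Claim_equal_get_string_map := by
  intro tiles pos _ hpre
  unfold Spec_get_string_map
  rw [a_eq tiles pos, alt_eq tiles pos hpre]
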